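-- pv_equiv track=rewrite | github.com/iree-org/iree-llvm-sandbox | python/conv/definitions.py | find_contiguous_rank_dims
-- ===== SOURCE A (Python) =====
-- from typing import List, Optional, Sequence, Tuple, Union
--
-- RANK_RELATED_DIMS = "DHW"
--
-- def find_contiguous_rank_dims(lst: str) -> Tuple[int, int]:
--   """Returns a the positions of the rank-related dimensions in the list.
--
--   Return a pair of values where the first value is the index of the first
--   rank-related dimension and the second value is the index of the dimension
--   immediately after the last rank-related dimension in the input format string.
--   Expects rank-related dimensions to be contiguous in the format.
--
--   Arguments:
--   lst: convolution format string containing 'D', 'H' and 'W' to indicate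
--     rank-related dimensions.
--   """
--   start, end = None, None
--   for i, char in enumerate(lst):
--     if char in RANK_RELATED_DIMS:
--       if start is None:
--         start = i
--       end = i
--   return start, end + 1
-- ===== SOURCE B (Python) =====
-- RANK_RELATED_DIMS = "DHW"
--
-- def find_contiguous_rank_dims(lst):
--   # forward scan for the first rank-related index
--   start = next((i for i, c in enumerate(lst) if c in RANK_RELATED_DIMS), None)
--   # backward scan for the last rank-related index
--   end = next((i for i in range(len(lst) - 1, -1, -1)
--               if lst[i] in RANK_RELATED_DIMS), None)
--   return start, end + 1
-- ===== Notes on version B (the rewrite author's own statement) =====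
-- stated objective: alternative
-- what changed: Replaces the single combined loop carrying (start, end) state with two independent directional scans: a forward generator for the first rank-related index and a backward scan over range(len-1,-1,-1) for the last.
-- outside the precondition, e.g. on find_contiguous_rank_dims('NC'): A raises TypeError, B raises TypeError
import Mathlib
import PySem

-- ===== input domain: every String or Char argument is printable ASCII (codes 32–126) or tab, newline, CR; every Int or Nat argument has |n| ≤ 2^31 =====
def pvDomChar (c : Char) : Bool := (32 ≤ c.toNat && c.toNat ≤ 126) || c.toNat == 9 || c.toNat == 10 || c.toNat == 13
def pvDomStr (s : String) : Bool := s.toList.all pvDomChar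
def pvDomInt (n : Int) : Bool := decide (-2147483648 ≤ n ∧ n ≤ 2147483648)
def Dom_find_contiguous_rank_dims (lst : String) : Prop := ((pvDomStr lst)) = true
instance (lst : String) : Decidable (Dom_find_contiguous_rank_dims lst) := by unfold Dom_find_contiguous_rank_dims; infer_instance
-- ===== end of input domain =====

-- B replaces A's single state-carrying loop by two independent directional scans (forward for the
-- first index, backward for the last); same cost, different decomposition. Equivalence is claimed
-- on strings containing a rank-related dimension (Pre_); elsewhere both Pythons raise TypeError.

def pvIsRank (c : Char) : Bool := c = 'D' || c = 'H' || c = 'W'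

-- ===== PORT A =====
-- A's single for-loop over enumerate(lst) carrying the (start, end) option pair.
def pvGoA : List Char → Nat → Option Int → Option Int → Option Int × Option Int
  | [], _, s, e => (s, e)
  | c :: cs, i, s, e =>
    if pvIsRank c then
      pvGoA cs (i + 1) (if s = none then some (i : Int) else s) (some (i : Int))
    else
      pvGoA cs (i + 1) s e

-- `end + 1` raises TypeError when end is None; that case is outside Pre_ (getD 0 is unreachable there).
def find_contiguous_rank_dims (lst : String) : Int × Int :=
  let se := pvGoA lst.toList 0 none none
  (se.1.getD 0, se.2.getD 0 + 1)

-- ===== PORT B =====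
-- forward generator: first i with lst[i] a rank-related dim
def pvFwd : List Char → Nat → Option Int
  | [], _ => none
  | c :: cs, i => if pvIsRank c then some (i : Int) else pvFwd cs (i + 1)

-- backward generator over range(len-1, -1, -1): first (from the right) i with lst[i] rank-related;
-- k counts down, inspecting index k-1 via getD (index always in range while k > 0).
def pvBwd (cs : List Char) : Nat → Option Int
  | 0 => none
  | k + 1 => if pvIsRank (cs.getD k ' ') then some (k : Int) else pvBwd cs k

def find_contiguous_rank_dims_alt (lst : String) : Int × Int :=
  let cs := lst.toList
  let start := pvFwd cs 0
  let «end» := pvBwd cs cs.length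
  (start.getD 0, «end».getD 0 + 1)

-- ===== PRECONDITION & SPEC =====
-- Pre_ excludes strings with no 'D'/'H'/'W': there both Pythons raise TypeError (None + 1).
def Pre_find_contiguous_rank_dims (lst : String) : Prop :=
  'D' ∈ lst.toList ∨ 'H' ∈ lst.toList ∨ 'W' ∈ lst.toList
instance (lst : String) : Decidable (Pre_find_contiguous_rank_dims lst) := by
  unfold Pre_find_contiguous_rank_dims; infer_instance

def pvWitness_find_contiguous_rank_dims : String := "NDHWC"

def Spec_find_contiguous_rank_dims (lst : String) (out : Int × Int) : Prop := out = find_contiguous_rank_dims_alt lst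
instance (lst : String) (out : Int × Int) : Decidable (Spec_find_contiguous_rank_dims lst out) := by unfold Spec_find_contiguous_rank_dims; infer_instance

-- ===== CLAIM (what is proved, stated in full; the proofs are below) =====
def Claim_equal_find_contiguous_rank_dims : Prop := ∀ (lst : String), Dom_find_contiguous_rank_dims lst → Pre_find_contiguous_rank_dims lst → Spec_find_contiguous_rank_dims lst (find_contiguous_rank_dims lst)

-- ===== LEMMAS AND PROOFS =====

-- last rank-related index of cs, indices offset by i (proof-side characterisation)
def pvLast : List Char → Nat → Option Int
  | [], _ => none
  | c :: cs, i =>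
    match pvLast cs (i + 1) with
    | some j => some j
    | none => if pvIsRank c then some (i : Int) else none

theorem pvGoA_spec (cs : List Char) : ∀ (i : Nat) (s e : Option Int),
    pvGoA cs i s e = ((if s = none then pvFwd cs i else s),
                      (match pvLast cs i with | some j => some j | none => e)) := by
  induction cs with
  | nil => intro i s e; simp [pvGoA, pvFwd, pvLast]
  | cons c cs ih =>
    intro i s e
    by_cases hc : pvIsRank c
    · simp only [pvGoA, pvFwd, pvLast, hc, if_true, ih]
      cases s <;> cases h : pvLast cs (i + 1) <;> simp
    · simp only [pvGoA, pvFwd, pvLast, hc, ih]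
      cases h : pvLast cs (i + 1) <;> simp

theorem pvBwd_stable (ds : List Char) (c : Char) : ∀ (k : Nat), k ≤ ds.length →
    pvBwd (ds ++ [c]) k = pvBwd ds k := by
  intro k
  induction k with
  | zero => intro _; simp [pvBwd]
  | succ k ih =>
    intro hk
    have hlt : k < ds.length := hk
    simp [pvBwd, List.getD, List.getElem?_append_left hlt, ih (Nat.le_of_lt hlt)]

theorem pvLast_append (c : Char) : ∀ (ds : List Char) (i : Nat),
    pvLast (ds ++ [c]) i =
      if pvIsRank c then some ((i + ds.length : Nat) : Int) else pvLast ds i := by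
  intro ds
  induction ds with
  | nil => intro i; simp [pvLast]
  | cons d ds ih =>
    intro i
    simp only [List.cons_append, pvLast, ih (i + 1)]
    by_cases hc : pvIsRank c
    · simp [hc]; omega
    · simp [hc]

theorem pvBwd_eq_pvLast (cs : List Char) : pvBwd cs cs.length = pvLast cs 0 := by
  induction cs using List.reverseRecOn with
  | nil => simp [pvBwd, pvLast]
  | append_singleton ds c ih =>
    have hlen : (ds ++ [c]).length = ds.length + 1 := by simp
    rw [hlen]
    have hget : (ds ++ [c]).getD ds.length ' ' = c := by
      simp [List.getD]

    simp only [pvBwd, hget, pvLast_append, pvBwd_stable ds c ds.length (Nat.le_refl _), ih]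
    by_cases hc : pvIsRank c <;> simp [hc]

-- ===== VERDICT (by name: the statement is the Claim_ definition above) =====
theorem find_contiguous_rank_dims_spec : Claim_equal_find_contiguous_rank_dims := by
  intro lst _ _
  unfold Spec_find_contiguous_rank_dims find_contiguous_rank_dims find_contiguous_rank_dims_alt
  simp only [pvGoA_spec, pvBwd_eq_pvLast]
  cases h : pvLast lst.toList 0 <;> simp
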